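-- pv_equiv track=rewrite | github.com/MrBrantCode/unitest_baseline | mut_generate/mist_train_cf/cf_12237/solution.py | is_overflow
-- ===== SOURCE A (Python) =====
-- def is_overflow(function_calls):
--     """
--     Determine if a list of function calls would cause a stack overflow error.
--
--     Args:
--     function_calls (list): A list of function names representing the order of function calls.
--
--     Returns:
--     bool: True if the function calls would cause a stack overflow error, False otherwise.
--     """
--     max_stack_size = 1000  # Assuming a maximum stack size of 1000
--     stack = []
--
--     for func in function_calls:
--         if len(stack) >= max_stack_size:
--             return True
--         stack.append(func)
--
--     return False
-- ===== SOURCE B (Python) =====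
-- def is_overflow(function_calls):
--     return len(function_calls) > 1000
-- ===== Notes on version B (the rewrite author's own statement) =====
-- stated objective: simpler
-- what changed: Replaced the loop that pushes each call onto a throwaway stack until it exceeds 1000 with a single closed-form length comparison len(function_calls) > 1000.
import Mathlib
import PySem

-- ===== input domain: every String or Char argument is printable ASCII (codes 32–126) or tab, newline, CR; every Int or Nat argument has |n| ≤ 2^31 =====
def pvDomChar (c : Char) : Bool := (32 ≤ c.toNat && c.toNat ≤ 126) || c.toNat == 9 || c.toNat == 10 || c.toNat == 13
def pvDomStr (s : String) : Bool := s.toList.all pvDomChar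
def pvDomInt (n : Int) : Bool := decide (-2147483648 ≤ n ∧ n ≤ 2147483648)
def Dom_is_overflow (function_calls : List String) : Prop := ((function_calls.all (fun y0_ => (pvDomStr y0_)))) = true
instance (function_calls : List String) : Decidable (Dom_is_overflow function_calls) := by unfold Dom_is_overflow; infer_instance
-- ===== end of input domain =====

-- B replaces A's stack-accumulating loop with a single closed-form length comparison (simpler).

-- ===== PORT A =====
-- A's loop: carry the growing stack, return True as soon as its length reaches 1000 with a call remaining.
def is_overflow_loop (stack : List String) (rest : List String) : Bool :=
  match rest with
  | [] => false
  | f :: rest' =>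
    if stack.length ≥ 1000 then true
    else is_overflow_loop (stack ++ [f]) rest'

def is_overflow (function_calls : List String) : Bool :=
  is_overflow_loop [] function_calls

-- ===== PORT B =====
def is_overflow_alt (function_calls : List String) : Bool :=
  decide (function_calls.length > 1000)

-- ===== PRECONDITION & SPEC =====
def Spec_is_overflow (function_calls : List String) (out : Bool) : Prop := out = is_overflow_alt function_calls
instance (function_calls : List String) (out : Bool) : Decidable (Spec_is_overflow function_calls out) := by unfold Spec_is_overflow; infer_instance

-- ===== CLAIM (what is proved, stated in full; the proofs are below) =====
def Claim_equal_is_overflow : Prop := ∀ (function_calls : List String), Dom_is_overflow function_calls → Spec_is_overflow function_calls (is_overflow function_calls)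

-- ===== LEMMAS AND PROOFS =====
lemma is_overflow_loop_eq (rest : List String) :
    ∀ (stack : List String), stack.length ≤ 1000 →
      is_overflow_loop stack rest = decide (stack.length + rest.length > 1000) := by
  induction rest with
  | nil =>
    intro stack h
    simp [is_overflow_loop]
    omega
  | cons f rest' ih =>
    intro stack h
    by_cases hs : stack.length ≥ 1000
    · simp [is_overflow_loop, hs, List.length_cons]
      omega
    · rw [is_overflow_loop]
      simp only [if_neg (by omega : ¬ stack.length ≥ 1000)]
      rw [ih (stack ++ [f]) (by simp; omega)]
      simp [List.length_cons]
      omega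

-- ===== VERDICT (by name: the statement is the Claim_ definition above) =====
theorem is_overflow_spec : Claim_equal_is_overflow := by
  intro l _
  unfold Spec_is_overflow is_overflow is_overflow_alt
  rw [is_overflow_loop_eq l [] (by simp)]
  simp
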